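-- pv_equiv track=rewrite | github.com/akikuno/csvtag | src/csvtag/combiner.py | _group_tags_by_distance
-- ===== SOURCE A (Python) =====
-- def _group_tags_by_distance(csv_tags: list[str], n_lengths: list[int], distance: int) -> list[list[str]]:
--     groups = []
--     current_group = [csv_tags[0]]
--
--     for i in range(len(n_lengths) - 1):
--         if n_lengths[i] <= distance:
--             current_group.append(csv_tags[i + 1])
--         else:
--             groups.append(current_group)
--             current_group = [csv_tags[i + 1]]
--
--     groups.append(current_group)
--     return groups
-- ===== SOURCE B (Python) =====
-- def _group_tags_by_distance(csv_tags: list[str], n_lengths: list[int], distance: int) -> list[list[str]]: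
--     first = csv_tags[0]  # evaluated eagerly: empty csv_tags raises IndexError, as in the original
--     m = len(n_lengths)
--     if m == 0:
--         return [[first]]
--     cuts = [0] + [i + 1 for i in range(m - 1) if n_lengths[i] > distance] + [m]
--     return [csv_tags[s:e] for s, e in zip(cuts, cuts[1:])]
-- ===== Notes on version B (the rewrite author's own statement) =====
-- stated objective: alternative
-- what changed: Replaces the streaming grow-or-flush accumulator loop with a two-phase shape: first collect the cut indices where a gap exceeds the distance, then emit the groups as slices of csv_tags between consecutive cuts.
import Mathlib
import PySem

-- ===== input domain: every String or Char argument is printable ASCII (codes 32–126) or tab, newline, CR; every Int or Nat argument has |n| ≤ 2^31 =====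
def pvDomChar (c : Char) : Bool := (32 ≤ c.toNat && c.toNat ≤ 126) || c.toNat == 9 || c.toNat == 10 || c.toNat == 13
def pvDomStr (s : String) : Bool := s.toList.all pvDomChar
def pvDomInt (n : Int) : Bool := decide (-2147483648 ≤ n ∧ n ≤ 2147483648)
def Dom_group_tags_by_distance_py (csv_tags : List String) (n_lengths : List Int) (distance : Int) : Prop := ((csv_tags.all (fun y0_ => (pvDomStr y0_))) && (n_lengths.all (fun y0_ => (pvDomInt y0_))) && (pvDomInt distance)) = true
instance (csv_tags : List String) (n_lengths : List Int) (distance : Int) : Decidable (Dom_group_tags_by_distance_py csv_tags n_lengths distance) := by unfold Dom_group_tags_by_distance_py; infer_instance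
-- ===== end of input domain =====

-- B groups by first collecting cut indices, then slicing between consecutive cuts; same O(n) cost, different shape (alternative).

-- ===== PORT A =====
def group_tags_by_distance_py (csv_tags : List String) (n_lengths : List Int) (distance : Int) : List (List String) :=
  -- groups = []; current_group = [csv_tags[0]]
  let st :=
    (PySem.List.pyRange 0 ((n_lengths.length : Int) - 1) 1).foldl
      (fun (st : List (List String) × List String) i =>
        if PySem.List.pyGetD n_lengths i 0 ≤ distance then
          (st.1, st.2 ++ [PySem.List.pyGetD csv_tags (i + 1) ""])
        else
          (st.1 ++ [st.2], [PySem.List.pyGetD csv_tags (i + 1) ""]))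
      (([] : List (List String)), [PySem.List.pyGetD csv_tags 0 ""])
  st.1 ++ [st.2]

-- ===== PORT B =====
def group_tags_by_distance_py_alt (csv_tags : List String) (n_lengths : List Int) (distance : Int) : List (List String) :=
  match PySem.List.pyGet? csv_tags 0 with
  | none => []  -- Python raises IndexError here (outside Pre_)
  | some first =>
    let m : Int := (n_lengths.length : Int)
    if m = 0 then [[first]]
    else
      let cuts : List Int :=
        [0] ++ (((PySem.List.pyRange 0 (m - 1) 1).filter
                  (fun i => decide (distance < PySem.List.pyGetD n_lengths i 0))).map (fun i => i + 1))
        ++ [m]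
      (cuts.zip cuts.tail).map (fun se => PySem.List.slice csv_tags (some se.1) (some se.2))

-- ===== PRECONDITION & SPEC =====
-- Pre_ excludes exactly the inputs on which A raises IndexError: empty csv_tags, or fewer tags than lengths.
def Pre_group_tags_by_distance_py (csv_tags : List String) (n_lengths : List Int) (distance : Int) : Prop :=
  csv_tags ≠ [] ∧ n_lengths.length ≤ csv_tags.length
instance (csv_tags : List String) (n_lengths : List Int) (distance : Int) : Decidable (Pre_group_tags_by_distance_py csv_tags n_lengths distance) := by unfold Pre_group_tags_by_distance_py; infer_instance

def pvWitness_group_tags_by_distance_py : List String × List Int × Int := (["a", "b", "c"], [1, 5], 3)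

def Spec_group_tags_by_distance_py (csv_tags : List String) (n_lengths : List Int) (distance : Int) (out : List (List String)) : Prop := out = group_tags_by_distance_py_alt csv_tags n_lengths distance
instance (csv_tags : List String) (n_lengths : List Int) (distance : Int) (out : List (List String)) : Decidable (Spec_group_tags_by_distance_py csv_tags n_lengths distance out) := by unfold Spec_group_tags_by_distance_py; infer_instance

-- ===== CLAIM (what is proved, stated in full; the proofs are below) =====
def Claim_equal_group_tags_by_distance_py : Prop := ∀ (csv_tags : List String) (n_lengths : List Int) (distance : Int), Dom_group_tags_by_distance_py csv_tags n_lengths distance → Pre_group_tags_by_distance_py csv_tags n_lengths distance → Spec_group_tags_by_distance_py csv_tags n_lengths distance (group_tags_by_distance_py csv_tags n_lengths distance)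

-- ===== LEMMAS AND PROOFS =====

-- slice of csv_tags between Nat positions s and e (matches PySem.List.slice on natCasts)
def sliceN (t : List String) (s e : Nat) : List String := (t.drop s).take (e - s)

-- consecutive pairs of a list (zip l l.tail)
def zpairs : List Nat → List (Nat × Nat)
  | a :: b :: r => (a, b) :: zpairs (b :: r)
  | _ => []

-- last element with default 0
def lastD (l : List Nat) : Nat := l.foldl (fun _ b => b) 0

-- B's cut positions restricted to the first j gaps
def cutsUpTo (nl : List Int) (d : Int) (j : Nat) : List Nat :=
  0 :: (((List.range j).filter (fun k => decide (d < nl.getD k 0))).map (fun k => k + 1))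

-- the groups cut out of t by a list of cut positions
def grps (t : List String) (cs : List Nat) : List (List String) :=
  (zpairs cs).map (fun se => sliceN t se.1 se.2)

theorem lastD_append (l : List Nat) (y : Nat) : lastD (l ++ [y]) = y := by
  simp [lastD, List.foldl_append]

theorem zpairs_append (l : List Nat) (h : l ≠ []) (y : Nat) :
    zpairs (l ++ [y]) = zpairs l ++ [(lastD l, y)] := by
  induction l with
  | nil => exact absurd rfl h
  | cons a r ih =>
    cases r with
    | nil => simp [zpairs, lastD]
    | cons b r' =>
      have := ih (by simp)
      simp only [List.cons_append, zpairs] at this ⊢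
      rw [this]
      simp [lastD]

theorem grps_append (t : List String) (l : List Nat) (h : l ≠ []) (y : Nat) :
    grps t (l ++ [y]) = grps t l ++ [sliceN t (lastD l) y] := by
  simp [grps, zpairs_append l h y]

theorem zip_tail_map (c : Nat → Int) (l : List Nat) :
    (l.map c).zip ((l.map c).tail) = (zpairs l).map (fun p => (c p.1, c p.2)) := by
  induction l with
  | nil => simp [zpairs]
  | cons a r ih =>
    cases r with
    | nil => simp [zpairs]
    | cons b r' =>
      simp only [List.map_cons, List.tail_cons, List.zip_cons_cons, zpairs] at ih ⊢
      rw [ih]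

theorem cuts_succ (nl : List Int) (d : Int) (j : Nat) :
    cutsUpTo nl d (j + 1) =
      if d < nl.getD j 0 then cutsUpTo nl d j ++ [j + 1] else cutsUpTo nl d j := by
  simp only [cutsUpTo, List.range_succ, List.filter_append, List.filter_cons,
    List.filter_nil, decide_eq_true_eq]
  split_ifs with h <;> simp

theorem cutsUpTo_ne_nil (nl : List Int) (d : Int) (j : Nat) : cutsUpTo nl d j ≠ [] := by
  simp [cutsUpTo]

theorem lastD_cuts_le (nl : List Int) (d : Int) : ∀ j, lastD (cutsUpTo nl d j) ≤ j := by
  intro j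
  induction j with
  | zero => simp [cutsUpTo, lastD]
  | succ j ih =>
    rw [cuts_succ]
    split_ifs with h
    · rw [lastD_append]
    · omega

theorem sliceN_extend (t : List String) (s e : Nat) (h1 : s ≤ e) (h2 : e < t.length) :
    sliceN t s (e + 1) = sliceN t s e ++ [t.getD e ""] := by
  unfold sliceN
  have he : e + 1 - s = (e - s) + 1 := by omega
  have hlt : e - s < (t.drop s).length := by
    rw [List.length_drop]; omega
  rw [he, List.take_add_one, List.getElem?_eq_getElem hlt, List.getElem_drop]
  have hse : s + (e - s) = e := by omega
  simp [hse, List.getD_eq_getElem?_getD, List.getElem?_eq_getElem h2]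

theorem sliceN_single (t : List String) (e : Nat) (h : e < t.length) :
    sliceN t e (e + 1) = [t.getD e ""] := by
  have := sliceN_extend t e e le_rfl h
  simpa [sliceN] using this

-- A's loop state after the first j iterations, in terms of B's cuts
theorem foldlA_inv (csv : List String) (nl : List Int) (d : Int)
    (hlen : nl.length ≤ csv.length) (c : String) (cs : List String) (hcsv : csv = c :: cs) :
    ∀ j, j + 1 ≤ nl.length →
      (List.range j).foldl
          (fun (st : List (List String) × List String) k =>
            if nl.getD k 0 ≤ d then (st.1, st.2 ++ [csv.getD (k + 1) ""])
            else (st.1 ++ [st.2], [csv.getD (k + 1) ""]))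
          ([], [csv.getD 0 ""])
        = (grps csv (cutsUpTo nl d j), sliceN csv (lastD (cutsUpTo nl d j)) (j + 1)) := by
  intro j
  induction j with
  | zero =>
    intro _
    subst hcsv
    simp [cutsUpTo, lastD, grps, zpairs, sliceN]
  | succ j ih =>
    intro hj
    rw [List.range_succ, List.foldl_append, ih (by omega)]
    simp only [List.foldl_cons, List.foldl_nil]
    have hjlt : j + 1 < csv.length := by omega
    by_cases h : nl.getD j 0 ≤ d
    · rw [if_pos h, cuts_succ, if_neg (not_lt.mpr h)]
      rw [← sliceN_extend csv _ (j + 1) (by have := lastD_cuts_le nl d j; omega) hjlt]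
    · rw [if_neg h, cuts_succ, if_pos (lt_of_not_ge h)]
      rw [grps_append csv _ (cutsUpTo_ne_nil nl d j) (j + 1), lastD_append,
        sliceN_single csv (j + 1) hjlt]

-- B's Int cut list is the cast of the Nat cut list
theorem cutsInt_eq (nl : List Int) (d : Int) (n : Nat) :
    ([0] ++ (List.map (fun i => i + 1)
        (List.filter (fun i => decide (d < PySem.List.pyGetD nl i 0))
          (List.map (fun k : Nat => (k : Int)) (List.range (n - 1))))) ++ [(n : Int)])
      = List.map (fun k : Nat => (k : Int)) (cutsUpTo nl d (n - 1) ++ [n]) := by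
  rw [List.filter_map, List.map_map]
  have h2 : List.filter ((fun i => decide (d < PySem.List.pyGetD nl i 0)) ∘ fun k : Nat => (k : Int))
        (List.range (n - 1))
      = List.filter (fun k => decide (d < nl.getD k 0)) (List.range (n - 1)) := by
    apply List.filter_congr
    intro k _
    simp [Function.comp, PySem.List.pyGetD_natCast]
  rw [h2]
  have h3 : List.map ((fun i => i + 1) ∘ fun k : Nat => (k : Int))
        (List.filter (fun k => decide (d < nl.getD k 0)) (List.range (n - 1)))
      = List.map ((fun k : Nat => (k : Int)) ∘ fun k : Nat => k + 1)
        (List.filter (fun k => decide (d < nl.getD k 0)) (List.range (n - 1))) := by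
    apply List.map_congr_left
    intro k _
    simp [Function.comp]
  rw [h3, ← List.map_map]
  simp [cutsUpTo]

-- ===== VERDICT (by name: the statement is the Claim_ definition above) =====
theorem group_tags_by_distance_py_spec : Claim_equal_group_tags_by_distance_py := by
  intro csv nl d _ hpre
  obtain ⟨hne, hlen⟩ := hpre
  obtain ⟨c, cs, rfl⟩ := List.exists_cons_of_ne_nil hne
  unfold Spec_group_tags_by_distance_py group_tags_by_distance_py group_tags_by_distance_py_alt
  rw [PySem.List.pyGet?_zero]
  simp only [List.getElem?_cons_zero]
  rcases Nat.eq_zero_or_pos nl.length with hn | hn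
  · -- n_lengths is empty: both return [[csv_tags[0]]]
    rw [PySem.List.pyRange_one_eq_nil (by omega)]
    simp [hn, PySem.List.pyGetD_zero]
  · -- main case
    have hne0 : ((nl.length : Int)) ≠ 0 := by omega
    simp only [if_neg hne0]
    -- rewrite A's fold over pyRange into a fold over List.range with Nat indexing
    have h1 : ((nl.length : Int) - 1) = ((nl.length - 1 : Nat) : Int) := by omega
    rw [h1, PySem.List.pyRange_zero_nat, List.foldl_map]
    have hbody :
        (fun (st : List (List String) × List String) (k : Nat) =>
            if PySem.List.pyGetD nl ((k : Int)) 0 ≤ d then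
              (st.1, st.2 ++ [PySem.List.pyGetD (c :: cs) ((k : Int) + 1) ""])
            else (st.1 ++ [st.2], [PySem.List.pyGetD (c :: cs) ((k : Int) + 1) ""]))
          = (fun (st : List (List String) × List String) (k : Nat) =>
            if nl.getD k 0 ≤ d then (st.1, st.2 ++ [(c :: cs).getD (k + 1) ""])
            else (st.1 ++ [st.2], [(c :: cs).getD (k + 1) ""])) := by
      funext st k
      have hc : ((k : Int) + 1) = (((k + 1 : Nat)) : Int) := by push_cast; ring
      rw [hc, PySem.List.pyGetD_natCast, PySem.List.pyGetD_natCast]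
    rw [hbody]
    have hinit : PySem.List.pyGetD (c :: cs) 0 "" = (c :: cs).getD 0 "" :=
      PySem.List.pyGetD_zero (c :: cs) ""
    rw [hinit,
      foldlA_inv (c :: cs) nl d hlen c cs rfl (nl.length - 1) (by omega)]
    -- assemble A's result
    have hsub : nl.length - 1 + 1 = nl.length := by omega
    rw [hsub]
    rw [← grps_append (c :: cs) _ (cutsUpTo_ne_nil nl d (nl.length - 1)) nl.length]
    -- B's side
    rw [cutsInt_eq nl d nl.length, zip_tail_map]
    unfold grps
    rw [List.map_map]
    congr 1
    funext p
    simp [PySem.List.slice_natCast, sliceN]
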